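-- pv_equiv track=rewrite | github.com/rsprenkels/kattis | python/1_8/prerequisites.py | prereq
-- ===== SOURCE A (Python) =====
-- from typing import Sequence, Tuple
--
-- def prereq(courses: Sequence[int], categories: Sequence[Tuple[int, Sequence[int]]]) -> bool:
--     taken_in_category = [0] * len(categories)
--     for course in courses:
--         for ndx, category in enumerate(categories):
--             if course in category[1]:
--                 taken_in_category[ndx] += 1
--     for ndx, category in enumerate(categories):
--         if taken_in_category[ndx] < category[0]:
--             return False
--     return True
-- ===== SOURCE B (Python) =====
-- from typing import Sequence, Tuple
--
-- def prereq(courses: Sequence[int], categories: Sequence[Tuple[int, Sequence[int]]]) -> bool: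
--     # Index the courses once in a multiplicity map; then each category's taken-count
--     # is the sum of multiplicities over the DISTINCT courses of its list (duplicates
--     # in the category list must not double-count), with an early False return.
--     cnt = {}
--     for c in courses:
--         cnt[c] = cnt.get(c, 0) + 1
--     for req, clist in categories:
--         taken = 0
--         seen = set()
--         for c in clist:
--             if c not in seen:
--                 seen.add(c)
--                 taken += cnt.get(c, 0)
--         if taken < req:
--             return False
--     return True
-- ===== Notes on version B (the rewrite author's own statement) =====
-- stated objective: faster
-- what changed: Instead of A's per-course membership scans of every category list into a counter array plus a second check loop, B builds a hash multiplicity map of the courses once and computes each category's taken-count as the sum of multiplicities over the distinct elements of its course list, returning False at the first failing category; the inner 'course in clist' scan disappears.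
import Mathlib
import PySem

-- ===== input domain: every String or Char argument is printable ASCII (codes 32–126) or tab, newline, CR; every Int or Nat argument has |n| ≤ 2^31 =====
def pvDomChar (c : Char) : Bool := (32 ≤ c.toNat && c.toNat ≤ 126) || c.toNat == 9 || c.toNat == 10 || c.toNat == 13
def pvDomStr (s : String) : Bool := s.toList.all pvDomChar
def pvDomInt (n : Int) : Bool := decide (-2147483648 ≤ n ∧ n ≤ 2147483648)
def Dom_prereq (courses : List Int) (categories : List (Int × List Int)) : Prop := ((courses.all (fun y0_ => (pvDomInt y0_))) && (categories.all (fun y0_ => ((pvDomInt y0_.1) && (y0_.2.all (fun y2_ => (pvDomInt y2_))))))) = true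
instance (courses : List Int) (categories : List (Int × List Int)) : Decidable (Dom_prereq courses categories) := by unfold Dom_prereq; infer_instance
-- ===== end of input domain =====

-- B indexes the courses once in a multiplicity map and sums multiplicities over the distinct
-- elements of each category's list (early False return), removing A's inner membership scans.

-- ===== PORT A =====
-- inner `for ndx, category in enumerate(categories): if course in category[1]: taken_in_category[ndx] += 1`
def prereqInner (course : Int) : List (Int × List Int) → Nat → List Int → List Int
  | [], _, acc => acc
  | cat :: rest, ndx, acc =>
      prereqInner course rest (ndx + 1) (if course ∈ cat.2 then acc.modify ndx (· + 1) else acc)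

-- final `for ndx, category in enumerate(categories): if taken_in_category[ndx] < category[0]: return False`
def prereqCheck (counts : List Int) : List (Int × List Int) → Nat → Bool
  | [], _ => true
  | cat :: rest, ndx => if counts.getD ndx 0 < cat.1 then false else prereqCheck counts rest (ndx + 1)

def prereq (courses : List Int) (categories : List (Int × List Int)) : Bool :=
  let taken_in_category :=
    courses.foldl (fun acc course => prereqInner course categories 0 acc)
      (List.replicate categories.length 0)
  prereqCheck taken_in_category categories 0

-- ===== PORT B =====
-- `for c in clist: if c not in seen: seen.add(c); taken += cnt.get(c, 0)`
def prereqAltCount (cnt : PySem.Dict Int Int) : List Int → PySem.Set Int → Int → Int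
  | [], _, taken => taken
  | c :: rest, seen, taken =>
      if seen.contains c then prereqAltCount cnt rest seen taken
      else prereqAltCount cnt rest (seen.add c) (taken + cnt.getD c 0)

-- `for req, clist in categories: … if taken < req: return False` / final `return True`
def prereqAltCheck (cnt : PySem.Dict Int Int) : List (Int × List Int) → Bool
  | [] => true
  | cat :: rest =>
      if prereqAltCount cnt cat.2 PySem.Set.empty 0 < cat.1 then false
      else prereqAltCheck cnt rest

def prereq_alt (courses : List Int) (categories : List (Int × List Int)) : Bool :=
  let cnt := courses.foldl (fun d c => d.insert c (d.getD c 0 + 1)) PySem.Dict.empty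
  prereqAltCheck cnt categories

-- ===== PRECONDITION & SPEC =====
def Spec_prereq (courses : List Int) (categories : List (Int × List Int)) (out : Bool) : Prop := out = prereq_alt courses categories
instance (courses : List Int) (categories : List (Int × List Int)) (out : Bool) : Decidable (Spec_prereq courses categories out) := by unfold Spec_prereq; infer_instance

-- ===== CLAIM (what is proved, stated in full; the proofs are below) =====
def Claim_equal_prereq : Prop := ∀ (courses : List Int) (categories : List (Int × List Int)), Dom_prereq courses categories → Spec_prereq courses categories (prereq courses categories)

-- ===== LEMMAS AND PROOFS =====

-- A-side characterisation: per-category count by a direct fold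
def pvCnt (courses : List Int) (cat : Int × List Int) : Int :=
  courses.foldl (fun s course => s + (if course ∈ cat.2 then 1 else 0)) 0

theorem pvModify_mid : ∀ (pre m : List Int) (f : Int → Int) (a : Int),
    (pre ++ a :: m).modify pre.length f = pre ++ f a :: m := by
  intro pre
  induction pre with
  | nil => intro m f a; simp [List.modify]
  | cons x xs ih => intro m f a; simp [List.modify] at *; exact ih m f a

theorem pvGetD_mid : ∀ (pre : List Int) (a : Int) (m : List Int),
    (pre ++ a :: m).getD pre.length 0 = a := by
  intro pre
  induction pre with
  | nil => intro a m; rfl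
  | cons x xs ih => intro a m; simpa using ih a m

theorem pvInner_eq : ∀ (cats : List (Int × List Int)) (pre m : List Int) (course : Int),
    m.length = cats.length →
    prereqInner course cats pre.length (pre ++ m)
      = pre ++ List.zipWith (fun a cat => if course ∈ cat.2 then a + 1 else a) m cats := by
  intro cats
  induction cats with
  | nil => intro pre m course h; simp at h; simp [prereqInner, h]
  | cons cat rest ih =>
    intro pre m course h
    cases m with
    | nil => simp at h
    | cons a m' =>
      simp at h
      have step : (if course ∈ cat.2 then (pre ++ a :: m').modify pre.length (· + 1) else pre ++ a :: m')
          = pre ++ (if course ∈ cat.2 then a + 1 else a) :: m' := by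
        by_cases hm : course ∈ cat.2 <;> simp [hm, pvModify_mid]
      have := ih (pre ++ [(if course ∈ cat.2 then a + 1 else a)]) m' course h
      simp only [prereqInner, step]
      rw [show pre.length + 1 = (pre ++ [(if course ∈ cat.2 then a + 1 else a)]).length by simp]
      rw [show pre ++ (if course ∈ cat.2 then a + 1 else a) :: m'
            = (pre ++ [(if course ∈ cat.2 then a + 1 else a)]) ++ m' by simp]
      rw [this]; simp [List.zipWith]

theorem pvZipZip : ∀ (f g : Int → (Int × List Int) → Int) (xs : List Int) (cats : List (Int × List Int)),
    List.zipWith g (List.zipWith f xs cats) cats = List.zipWith (fun x c => g (f x c) c) xs cats := by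
  intro f g xs
  induction xs generalizing f g with
  | nil => intro cats; simp
  | cons x xs ih =>
    intro cats; cases cats with
    | nil => simp
    | cons c cs => simp [List.zipWith, ih]

theorem pvFoldShift (w : Int → Int) : ∀ (cs : List Int) (s : Int),
    cs.foldl (fun s c => s + w c) s = s + cs.foldl (fun s c => s + w c) 0 := by
  intro cs
  induction cs with
  | nil => intro s; simp
  | cons c cs ih => intro s; simp only [List.foldl]; rw [ih (s + w c), ih (0 + w c)]; ring

theorem pvCnt_cons (c : Int) (cs : List Int) (cat : Int × List Int) :
    pvCnt (c :: cs) cat = (if c ∈ cat.2 then 1 else 0) + pvCnt cs cat := by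
  simp only [pvCnt, List.foldl]
  rw [pvFoldShift (fun course => if course ∈ cat.2 then 1 else 0) cs (0 + if c ∈ cat.2 then 1 else 0)]
  ring

theorem pvCounts_eq : ∀ (cs : List Int) (cats : List (Int × List Int)) (init : List Int),
    init.length = cats.length →
    cs.foldl (fun acc course => prereqInner course cats 0 acc) init
      = List.zipWith (fun i cat => i + pvCnt cs cat) init cats := by
  intro cs
  induction cs with
  | nil =>
    intro cats init h
    simp only [List.foldl]
    have self : ∀ (init' : List Int) (cats' : List (Int × List Int)), init'.length = cats'.length →
        List.zipWith (fun (i : Int) (_ : Int × List Int) => i) init' cats' = init' := by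
      intro init'
      induction init' with
      | nil => intro cats' _; simp
      | cons a as ih =>
        intro cats' h'
        cases cats' with
        | nil => simp at h'
        | cons c cs' => simp at h'; simp [List.zipWith, ih cs' h']
    simp [pvCnt, List.foldl, self init cats h]
  | cons c cs ih =>
    intro cats init h
    simp only [List.foldl]
    have hinner := pvInner_eq cats [] init c h
    simp at hinner
    rw [hinner]
    rw [ih cats _ (by simp [h])]
    rw [pvZipZip]
    congr 1
    funext x cat
    rw [pvCnt_cons]
    by_cases hm : c ∈ cat.2 <;> simp [hm] <;> ring

theorem pvReplZip (h : (Int × List Int) → Int) : ∀ (cats : List (Int × List Int)),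
    List.zipWith (fun i cat => i + h cat) (List.replicate cats.length 0) cats = cats.map h := by
  intro cats
  induction cats with
  | nil => simp
  | cons c cs ih => simp [List.replicate, ih]

theorem pvCheck_eq (h : (Int × List Int) → Int) : ∀ (cats : List (Int × List Int)) (pre : List Int),
    prereqCheck (pre ++ cats.map h) cats pre.length = cats.all (fun cat => decide (cat.1 ≤ h cat)) := by
  intro cats
  induction cats with
  | nil => intro pre; simp [prereqCheck]
  | cons cat rest ih =>
    intro pre
    simp only [prereqCheck, List.map, List.all_cons]
    rw [pvGetD_mid pre (h cat) (rest.map h)]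
    have := ih (pre ++ [h cat])
    simp at this
    by_cases hc : h cat < cat.1
    · simp [hc, show ¬ (cat.1 ≤ h cat) by omega]
    · simp only [hc, if_false]
      rw [show pre.length + 1 = (pre ++ [h cat]).length by simp,
          show pre ++ h cat :: rest.map h = (pre ++ [h cat]) ++ rest.map h by simp]
      simp [this, show cat.1 ≤ h cat by omega]

-- so A's result is: all categories satisfy req ≤ pvCnt
theorem pvA_eq (courses : List Int) (cats : List (Int × List Int)) :
    prereq courses cats = cats.all (fun cat => decide (cat.1 ≤ pvCnt courses cat)) := by
  unfold prereq
  rw [pvCounts_eq courses cats _ (by simp)]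
  rw [pvReplZip (pvCnt courses) cats]
  have := pvCheck_eq (pvCnt courses) cats []
  simpa using this

-- pvCnt is a cast countP
theorem pvCnt_eq_countP (courses : List Int) (cat : Int × List Int) :
    pvCnt courses cat = (courses.countP (fun x => decide (x ∈ cat.2)) : Int) := by
  induction courses with
  | nil => simp [pvCnt]
  | cons c cs ih =>
    rw [pvCnt_cons, ih, List.countP_cons]
    by_cases hm : c ∈ cat.2 <;> simp [hm] <;> omega

-- pointwise-additive predicates split countP
theorem pvCountP_split (p q r : Int → Bool)
    (h : ∀ x, (if p x then (1:Nat) else 0) = (if q x then 1 else 0) + (if r x then 1 else 0)) :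
    ∀ xs : List Int, xs.countP p = xs.countP q + xs.countP r := by
  intro xs
  induction xs with
  | nil => simp
  | cons a as ih =>
    simp only [List.countP_cons, ih]
    have := h a
    split_ifs at * <;> omega

-- loop invariant for B's inner dedup-sum loop
theorem pvAltCount_eq (courses : List Int) (cnt : PySem.Dict Int Int)
    (hcnt : ∀ c, cnt.getD c 0 = (courses.count c : Int)) :
    ∀ (l : List Int) (seen : PySem.Set Int) (t : Int),
      prereqAltCount cnt l seen t
        = t + (courses.countP (fun x => decide (x ∈ l) && !(PySem.Set.contains seen x)) : Int) := by
  intro l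
  induction l with
  | nil => intro seen t; simp [prereqAltCount]
  | cons c rest ih =>
    intro seen t
    by_cases hc : PySem.Set.contains seen c = true
    · simp only [prereqAltCount]
      rw [if_pos hc, ih seen t]
      congr 2
      apply List.countP_congr
      intro x _
      by_cases hx : x = c
      · subst hx; simp_all
      · simp [hx]
    · simp only [prereqAltCount]
      rw [if_neg hc, ih (seen.add c) (t + cnt.getD c 0), hcnt c]
      have hsplit := pvCountP_split
        (fun x => decide (x ∈ c :: rest) && !(PySem.Set.contains seen x))
        (fun x => x == c)
        (fun x => decide (x ∈ rest) && !(PySem.Set.contains (seen.add c) x))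
        (by
          intro x
          by_cases hx : x = c
          · subst hx
            simp
            simpa using hc
          · simp [hx])
        courses
      have hcc : List.countP (fun x => x == c) courses = courses.count c := by
        simp [List.count_eq_countP]
      rw [hcc] at hsplit
      rw [hsplit]
      push_cast
      ring

-- B's outer loop is an `all` over categories
theorem pvAltCheck_eq (cnt : PySem.Dict Int Int) :
    ∀ cats : List (Int × List Int),
      prereqAltCheck cnt cats
        = cats.all (fun cat => decide (cat.1 ≤ prereqAltCount cnt cat.2 PySem.Set.empty 0)) := by
  intro cats
  induction cats with
  | nil => simp [prereqAltCheck]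
  | cons cat rest ih =>
    simp only [prereqAltCheck, List.all_cons, ih]
    by_cases hc : prereqAltCount cnt cat.2 PySem.Set.empty 0 < cat.1
    · rw [if_pos hc,
        decide_eq_false (show ¬ cat.1 ≤ prereqAltCount cnt cat.2 PySem.Set.empty 0 by omega)]
      simp
    · rw [if_neg hc,
        decide_eq_true (show cat.1 ≤ prereqAltCount cnt cat.2 PySem.Set.empty 0 by omega)]
      simp

-- ===== VERDICT (by name: the statement is the Claim_ definition above) =====
theorem prereq_spec : Claim_equal_prereq := by
  intro courses cats _
  unfold Spec_prereq
  rw [pvA_eq]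
  unfold prereq_alt
  have hcnt : ∀ c : Int,
      (courses.foldl (fun d c => d.insert c (d.getD c 0 + 1)) PySem.Dict.empty).getD c 0
        = (courses.count c : Int) := by
    intro c
    rw [PySem.Dict.getD_foldl_insert_add_one]
    simp
  simp only []
  rw [pvAltCheck_eq]
  congr 1
  funext cat
  rw [pvAltCount_eq courses _ hcnt cat.2 PySem.Set.empty 0]
  rw [pvCnt_eq_countP]
  simp
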